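-- pv_equiv track=rewrite | github.com/thomas-villani/all2md | src/all2md/utils/spreadsheet.py | trim_columns
-- ===== SOURCE A (Python) =====
-- from typing import Any, Literal
--
-- def trim_columns(rows: list[list[str]], trim_mode: Literal["none", "leading", "trailing", "both"]) -> list[list[str]]:
--     """Trim empty columns based on trim mode.
--
--     Parameters
--     ----------
--     rows : list[list[str]]
--         Rows to trim columns from
--     trim_mode : {'none', 'leading', 'trailing', 'both'}
--         Trimming mode
--
--     Returns
--     -------
--     list[list[str]]
--         Rows with trimmed columns
--
--     """
--     if not rows or trim_mode == "none":
--         return rows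
--
--     if not rows[0]:
--         return rows
--
--     num_cols = len(rows[0])
--
--     # Find leading empty columns
--     leading_empty = 0
--     if trim_mode in ("leading", "both"):
--         for col_idx in range(num_cols):
--             if all(row[col_idx] == "" if col_idx < len(row) else True for row in rows):
--                 leading_empty += 1
--             else:
--                 break
--
--     # Find trailing empty columns
--     trailing_empty = 0
--     if trim_mode in ("trailing", "both"):
--         for col_idx in range(num_cols - 1, -1, -1):
--             if all(row[col_idx] == "" if col_idx < len(row) else True for row in rows):
--                 trailing_empty += 1
--             else:
--                 break
--
--     # Trim columns
--     if leading_empty > 0 or trailing_empty > 0: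
--         end_col = num_cols - trailing_empty
--         return [row[leading_empty:end_col] for row in rows]
--
--     return rows
-- ===== SOURCE B (Python) =====
-- def trim_columns(rows, trim_mode):
--     if not rows or trim_mode == "none" or not rows[0]:
--         return rows
--     n = len(rows[0])
--
--     def run(cells):
--         k = 0
--         for s in cells:
--             if s != "":
--                 break
--             k += 1
--         return k
--
--     leading = 0
--     if trim_mode in ("leading", "both"):
--         leading = n
--         for row in rows:
--             r = row[:n]
--             k = run(r)
--             leading = min(leading, n if k == len(r) else k)
--
--     trailing = 0
--     if trim_mode in ("trailing", "both"):
--         trailing = n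
--         for row in rows:
--             r = row[:n]
--             trailing = min(trailing, run(r[::-1]) + (n - len(r)))
--
--     if leading == 0 and trailing == 0:
--         return rows
--     return [row[leading:n - trailing] for row in rows]
-- ===== Notes on version B (the rewrite author's own statement) =====
-- stated objective: alternative
-- what changed: B is row-major instead of column-major: it measures each row's leading/trailing run of empty cells once (one pass per row) and takes the minimum over rows, whereas A scans column indices and re-tests every row per column with an early break.
import Mathlib
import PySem

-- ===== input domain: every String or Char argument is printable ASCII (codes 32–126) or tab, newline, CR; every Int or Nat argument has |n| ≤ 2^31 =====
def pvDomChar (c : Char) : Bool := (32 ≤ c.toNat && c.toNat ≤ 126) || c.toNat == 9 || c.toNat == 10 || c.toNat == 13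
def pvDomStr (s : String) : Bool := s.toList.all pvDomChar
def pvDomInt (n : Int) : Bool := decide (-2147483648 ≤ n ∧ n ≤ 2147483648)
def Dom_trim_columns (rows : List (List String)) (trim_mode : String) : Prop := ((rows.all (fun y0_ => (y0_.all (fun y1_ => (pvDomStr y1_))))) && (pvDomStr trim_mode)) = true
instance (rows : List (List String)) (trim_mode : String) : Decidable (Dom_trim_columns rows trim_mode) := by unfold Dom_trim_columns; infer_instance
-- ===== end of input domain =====

-- B works row-wise: for each row it measures the leading/trailing run of empty cells once and
-- takes the minimum over rows, instead of A's column-wise scans that re-test every row per column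
-- (objective: alternative).

-- ===== PORT A =====
-- row[col_idx] == "" if col_idx < len(row) else True  (access guarded by col_idx < len(row))
def pvRowEmptyAt (row : List String) (c : Nat) : Bool :=
  if c < row.length then row.getD c "" == "" else true

-- all(... for row in rows)
def pvColEmptyA (rows : List (List String)) (c : Nat) : Bool :=
  rows.all (fun row => pvRowEmptyAt row c)

-- A's counting loop with break over the given column order
def pvLeadLoopA (rows : List (List String)) : List Nat → Nat → Nat
  | [], acc => acc
  | c :: rest, acc => if pvColEmptyA rows c then pvLeadLoopA rows rest (acc + 1) else acc

def trim_columns (rows : List (List String)) (trim_mode : String) : List (List String) :=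
  match rows with
  | [] => rows
  | r0 :: _ =>
    if trim_mode == "none" then rows
    else if r0.isEmpty then rows
    else
      let numCols := r0.length
      let leading := if trim_mode == "leading" || trim_mode == "both"
        then pvLeadLoopA rows (List.range numCols) 0 else 0
      let trailing := if trim_mode == "trailing" || trim_mode == "both"
        then pvLeadLoopA rows ((List.range numCols).reverse) 0 else 0
      if 0 < leading || 0 < trailing then
        rows.map (fun row => PySem.List.slice row (some (leading : Int)) (some ((numCols - trailing : Nat) : Int)))
      else rows

-- ===== PORT B =====
-- def run(cells): count leading "" cells, break at the first non-empty
def pvRun : List String → Nat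
  | [] => 0
  | s :: rest => if s == "" then pvRun rest + 1 else 0

-- per-row leading contribution: r = row[:n]; n if run(r) == len(r) else run(r)
def pvLeadRow (n : Nat) (row : List String) : Nat :=
  let r := row.take n
  let k := pvRun r
  if k = r.length then n else k

-- per-row trailing contribution: run(r[::-1]) + (n - len(r))
def pvTrailRow (n : Nat) (row : List String) : Nat :=
  let r := row.take n
  pvRun r.reverse + (n - r.length)

def trim_columns_alt (rows : List (List String)) (trim_mode : String) : List (List String) :=
  match rows with
  | [] => rows
  | r0 :: _ =>
    if trim_mode == "none" then rows
    else if r0.isEmpty then rows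
    else
      let n := r0.length
      let leading := if trim_mode == "leading" || trim_mode == "both"
        then rows.foldl (fun m row => min m (pvLeadRow n row)) n else 0
      let trailing := if trim_mode == "trailing" || trim_mode == "both"
        then rows.foldl (fun m row => min m (pvTrailRow n row)) n else 0
      if leading = 0 && trailing = 0 then rows
      else rows.map (fun row => PySem.List.slice row (some (leading : Int)) (some ((n - trailing : Nat) : Int)))

-- ===== PRECONDITION & SPEC =====
def Spec_trim_columns (rows : List (List String)) (trim_mode : String) (out : List (List String)) : Prop := out = trim_columns_alt rows trim_mode
instance (rows : List (List String)) (trim_mode : String) (out : List (List String)) : Decidable (Spec_trim_columns rows trim_mode out) := by unfold Spec_trim_columns; infer_instance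

-- ===== CLAIM =====
def Claim_equal_trim_columns : Prop := ∀ (rows : List (List String)) (trim_mode : String), Dom_trim_columns rows trim_mode → Spec_trim_columns rows trim_mode (trim_columns rows trim_mode)

-- ===== LEMMAS AND PROOFS =====

-- A's break loop counts the leading run of all-empty columns
theorem leadLoopA_eq (rows : List (List String)) (cols : List Nat) (acc : Nat) :
    pvLeadLoopA rows cols acc = acc + (cols.takeWhile (pvColEmptyA rows)).length := by
  induction cols generalizing acc with
  | nil => simp [pvLeadLoopA]
  | cons c rest ih =>
    unfold pvLeadLoopA
    by_cases h : pvColEmptyA rows c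
    · simp [h, ih]; omega
    · simp [h]

theorem takeWhile_true_len (L : List Nat) :
    (L.takeWhile (fun _ => true)).length = L.length := by
  induction L with
  | nil => rfl
  | cons c rest ih => simp [List.takeWhile_cons, ih]

-- leading run of a pointwise conjunction = min of the leading runs
theorem takeWhile_and_min (L : List Nat) (p q : Nat → Bool) :
    (L.takeWhile (fun c => p c && q c)).length
      = min (L.takeWhile p).length (L.takeWhile q).length := by
  induction L with
  | nil => simp
  | cons c rest ih =>
    by_cases hp : p c <;> by_cases hq : q c <;>
      simp [List.takeWhile_cons, hp, hq, ih] <;> omega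

theorem foldl_min_init {α : Type} (g : α → Nat) (l : List α) (a b : Nat) :
    l.foldl (fun m x => min m (g x)) (min a b)
      = min b (l.foldl (fun m x => min m (g x)) a) := by
  induction l generalizing a with
  | nil => simp [Nat.min_comm]
  | cons x xs ih =>
    simp only [List.foldl_cons]
    rw [show min (min a b) (g x) = min (min a (g x)) b by
          rw [Nat.min_assoc, Nat.min_comm b (g x), ← Nat.min_assoc], ih]

-- run length of "all rows empty" columns = min over rows of per-row run lengths
theorem takeWhile_all_foldl (rows : List (List String)) (L : List Nat)
    (f : List String → Nat → Bool) :
    (L.takeWhile (fun c => rows.all (fun r => f r c))).length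
      = rows.foldl (fun m r => min m ((L.takeWhile (f r)).length)) L.length := by
  induction rows with
  | nil => simp [takeWhile_true_len]
  | cons r rest ih =>
    simp only [List.all_cons, List.foldl_cons]
    rw [takeWhile_and_min L (f r) (fun c => rest.all (fun r' => f r' c)), ih,
        foldl_min_init, Nat.min_comm]

-- pvRowEmptyAt shifts down a cons
theorem rowEmptyAt_cons_succ (s : String) (rest : List String) (c : Nat) :
    pvRowEmptyAt (s :: rest) (c + 1) = pvRowEmptyAt rest c := by
  simp [pvRowEmptyAt]

theorem leadRow_cons_empty (rest : List String) (m : Nat) :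
    pvLeadRow (m + 1) ("" :: rest) = pvLeadRow m rest + 1 := by
  have hrun : pvRun ("" :: List.take m rest) = pvRun (List.take m rest) + 1 := by
    simp [pvRun]
  simp only [pvLeadRow, List.take_succ_cons, hrun, List.length_cons]
  split_ifs with h1 h2 h2 <;> omega

-- per-row leading run over columns 0..n-1 equals B's pvLeadRow
theorem rowLead (row : List String) (n : Nat) :
    ((List.range n).takeWhile (pvRowEmptyAt row)).length = pvLeadRow n row := by
  induction row generalizing n with
  | nil =>
    have : pvRowEmptyAt [] = fun _ => true := by
      funext c; simp [pvRowEmptyAt]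
    simp [this, takeWhile_true_len, pvLeadRow, pvRun]
  | cons s rest ih =>
    cases n with
    | zero => simp [pvLeadRow, pvRun]
    | succ m =>
      rw [List.range_succ_eq_map]
      by_cases hs : s == ""
      · have hs' : s = "" := by simpa using hs
        subst hs'
        have h0 : pvRowEmptyAt ("" :: rest) 0 = true := by
          simp [pvRowEmptyAt]
        simp only [List.takeWhile_cons, h0, if_true, List.length_cons,
          List.takeWhile_map, List.length_map]
        have hcomp : (pvRowEmptyAt ("" :: rest) ∘ Nat.succ) = pvRowEmptyAt rest := by
          funext c; exact rowEmptyAt_cons_succ "" rest c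
        rw [hcomp, ih m, leadRow_cons_empty]
      · have h0 : pvRowEmptyAt (s :: rest) 0 = false := by
          simp only [pvRowEmptyAt, List.length_cons]
          simp [List.getD]
          simpa using hs
        simp only [List.takeWhile_cons, h0, Bool.false_eq_true, if_false,
          List.length_nil]
        simp only [pvLeadRow, List.take_succ_cons, pvRun, hs, Bool.false_eq_true,
          if_false, List.length_cons]
        split_ifs <;> omega

-- per-row trailing run over columns n-1..0 equals B's pvTrailRow
theorem rowTrail (row : List String) (n : Nat) :
    (((List.range n).reverse).takeWhile (pvRowEmptyAt row)).length = pvTrailRow n row := by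
  induction n with
  | zero => simp [pvTrailRow, pvRun]
  | succ m ih =>
    have hrev : (List.range (m + 1)).reverse = m :: (List.range m).reverse := by
      rw [List.range_succ, List.reverse_append]; rfl
    rw [hrev, List.takeWhile_cons]
    by_cases hlt : m < row.length
    · have hget : row[m]? = some (row.getD m "") := by
        rw [List.getElem?_eq_getElem hlt, List.getD_eq_getElem row "" hlt]
      have htake : row.take (m + 1) = row.take m ++ [row.getD m ""] := by
        rw [List.take_succ, hget]; rfl
      have hrevtake : (row.take (m + 1)).reverse = row.getD m "" :: (row.take m).reverse := by
        rw [htake]; simp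
      have hlen1 : (row.take (m + 1)).length = m + 1 := by
        simp [List.length_take]; omega
      have hlen0 : (row.take m).length = m := by
        simp [List.length_take]; omega
      have hEmp : pvRowEmptyAt row m = (row.getD m "" == "") := by
        simp [pvRowEmptyAt, hlt]
      rw [hEmp]
      by_cases hv : (row.getD m "" == "") = true
      · have hv' : row.getD m "" = "" := by simpa using hv
        rw [hv, if_pos rfl, List.length_cons, ih]
        simp only [pvTrailRow, hrevtake, hv', hlen1, hlen0]
        have hrun : pvRun ("" :: (row.take m).reverse) = pvRun ((row.take m).reverse) + 1 := by
          simp [pvRun]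
        rw [hrun]
        omega
      · rw [Bool.of_not_eq_true hv, if_neg (by simp), List.length_nil]
        simp only [pvTrailRow, hrevtake, hlen1]
        have hrun : pvRun (row.getD m "" :: (row.take m).reverse) = 0 := by
          simp only [pvRun, hv, Bool.false_eq_true, if_false]
        rw [hrun]
        omega
    · have hEmp : pvRowEmptyAt row m = true := by
        simp only [pvRowEmptyAt]
        rw [if_neg hlt]
      rw [hEmp, if_pos rfl, List.length_cons, ih]
      have hle : row.length ≤ m := by omega
      simp only [pvTrailRow, List.take_of_length_le hle,
        List.take_of_length_le (Nat.le_succ_of_le hle)]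
      omega

-- B's leading count equals A's
theorem lead_counts_eq (rows : List (List String)) (n : Nat) :
    pvLeadLoopA rows (List.range n) 0
      = rows.foldl (fun m row => min m (pvLeadRow n row)) n := by
  rw [leadLoopA_eq, Nat.zero_add]
  have h : pvColEmptyA rows = fun c => rows.all (fun r => pvRowEmptyAt r c) := rfl
  rw [h, takeWhile_all_foldl rows (List.range n) pvRowEmptyAt]
  simp only [List.length_range, rowLead]

-- B's trailing count equals A's
theorem trail_counts_eq (rows : List (List String)) (n : Nat) :
    pvLeadLoopA rows (List.range n).reverse 0
      = rows.foldl (fun m row => min m (pvTrailRow n row)) n := by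
  rw [leadLoopA_eq, Nat.zero_add]
  have h : pvColEmptyA rows = fun c => rows.all (fun r => pvRowEmptyAt r c) := rfl
  rw [h, takeWhile_all_foldl rows (List.range n).reverse pvRowEmptyAt]
  simp only [List.length_reverse, List.length_range, rowTrail]

-- ===== VERDICT =====
theorem trim_columns_spec : Claim_equal_trim_columns := by
  intro rows trim_mode _
  unfold Spec_trim_columns trim_columns trim_columns_alt
  match rows with
  | [] => rfl
  | r0 :: rest =>
    by_cases hnone : (trim_mode == "none") = true
    · simp [hnone]
    · by_cases hempty : r0.isEmpty = true
      · simp [hnone, hempty]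
      · simp only [hnone, hempty, Bool.false_eq_true, if_false]
        rw [lead_counts_eq (r0 :: rest) r0.length, trail_counts_eq (r0 :: rest) r0.length]
        generalize (r0 :: rest).foldl (fun m row => min m (pvLeadRow r0.length row)) r0.length = Lc
        generalize (r0 :: rest).foldl (fun m row => min m (pvTrailRow r0.length row)) r0.length = Tc
        by_cases h1 : (trim_mode == "leading" || trim_mode == "both") = true <;>
        by_cases h2 : (trim_mode == "trailing" || trim_mode == "both") = true <;>
        by_cases hL : Lc = 0 <;>
        by_cases hT : Tc = 0 <;>
        simp [h1, h2, hL, hT, Nat.pos_iff_ne_zero]
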